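-- pv_equiv track=rewrite | github.com/rodsilca/Caca-niquel | slotMachine.py | checarGanhos
-- ===== SOURCE A (Python) =====
-- def checarGanhos(colunas,linhas, aposta,valores):
--     ganhos = 0
--     linhasGanhas = []
--     for linha in range(linhas):
--         simbolo = colunas[0][linha]
--         for coluna in colunas:
--             simbCheck = coluna[linha]
--             if simbolo != simbCheck:
--                 break
--         else:
--             ganhos += valores[simbolo] * aposta
--             linhasGanhas.append(linha+1)
--
--     return ganhos,linhasGanhas
-- ===== SOURCE B (Python) =====
-- def checarGanhos(colunas, linhas, aposta, valores):
--     linhasGanhas = [linha + 1 for linha in range(linhas)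
--                     if len({coluna[linha] for coluna in colunas}) == 1]
--     ganhos = aposta * sum(valores[colunas[0][linha - 1]] for linha in linhasGanhas)
--     return ganhos, linhasGanhas
-- ===== Notes on version B (the rewrite author's own statement) =====
-- stated objective: simpler
-- what changed: Replaces the break-on-mismatch inner loop with a per-row set of symbols whose cardinality is tested, builds the winning-line list as one comprehension, and computes the payout afterwards as aposta times a sum over the winning lines instead of an in-loop accumulator.
-- outside the precondition, e.g. on checarGanhos([['a', 'x'], ['b', 'y'], ['c']], 2, 1, {}): A returns (0, []), B raises IndexError
import Mathlib
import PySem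

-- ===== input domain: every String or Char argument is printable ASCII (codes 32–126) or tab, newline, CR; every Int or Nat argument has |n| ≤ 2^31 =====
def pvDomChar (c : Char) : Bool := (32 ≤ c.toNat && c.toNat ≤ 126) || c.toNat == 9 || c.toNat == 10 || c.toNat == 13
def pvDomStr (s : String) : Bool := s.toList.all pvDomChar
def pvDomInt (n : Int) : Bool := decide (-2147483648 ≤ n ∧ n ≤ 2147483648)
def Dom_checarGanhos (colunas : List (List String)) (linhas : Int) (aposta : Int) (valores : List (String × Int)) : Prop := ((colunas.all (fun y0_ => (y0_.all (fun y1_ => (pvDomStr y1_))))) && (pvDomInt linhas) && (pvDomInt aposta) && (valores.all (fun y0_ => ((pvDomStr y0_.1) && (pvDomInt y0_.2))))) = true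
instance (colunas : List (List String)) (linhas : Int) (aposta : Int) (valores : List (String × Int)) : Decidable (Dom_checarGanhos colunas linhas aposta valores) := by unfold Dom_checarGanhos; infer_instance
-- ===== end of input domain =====

-- B replaces A's break-on-mismatch inner loop by a per-row symbol set whose cardinality is tested,
-- and computes the payout afterwards from the winning-line list (objective: simpler).

-- ===== PORT A =====
-- inner 'for coluna in colunas: … break / else': true = the loop finished without break
def pvRowA (colunas : List (List String)) (linha : Int) (simbolo : String) : Bool :=
  match colunas with
  | [] => true
  | coluna :: rest =>
    match PySem.List.pyGet? coluna linha with
    | none => false       -- Python raises IndexError here; excluded by Pre_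
    | some simbCheck => if simbolo ≠ simbCheck then false else pvRowA rest linha simbolo

def checarGanhos (colunas : List (List String)) (linhas : Int) (aposta : Int) (valores : List (String × Int)) : Int × List Int :=
  (PySem.List.pyRange 0 linhas 1).foldl
    (fun st linha =>
      match PySem.List.pyGet? colunas 0 with
      | none => st        -- Python raises IndexError here; excluded by Pre_
      | some col0 =>
        match PySem.List.pyGet? col0 linha with
        | none => st      -- Python raises IndexError here; excluded by Pre_
        | some simbolo =>
          if pvRowA colunas linha simbolo then
            match (PySem.Dict.mk valores).get? simbolo with
            | none => st  -- Python raises KeyError here; excluded by Pre_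
            | some v => (st.1 + v * aposta, st.2 ++ [linha + 1])
          else st)
    ((0 : Int), ([] : List Int))

-- ===== PORT B =====
-- {coluna[linha] for coluna in colunas}
def pvRowSet (colunas : List (List String)) (linha : Int) : PySem.Set String :=
  PySem.Set.ofList (colunas.map (fun coluna => (PySem.List.pyGet? coluna linha).getD ""))

def checarGanhos_alt (colunas : List (List String)) (linhas : Int) (aposta : Int) (valores : List (String × Int)) : Int × List Int :=
  let linhasGanhas :=
    ((PySem.List.pyRange 0 linhas 1).filter
      (fun linha => PySem.Set.len (pvRowSet colunas linha) = 1)).map (fun linha => linha + 1)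
  let ganhos := aposta *
    (linhasGanhas.map (fun linha =>
      ((PySem.Dict.mk valores).get?
        ((PySem.List.pyGet? ((PySem.List.pyGet? colunas 0).getD []) (linha - 1)).getD "")).getD 0)).sum
  (ganhos, linhasGanhas)

-- ===== PRECONDITION & SPEC =====
-- Pre_ excludes inputs on which A raises (empty colunas with linhas > 0, a column shorter than
-- linhas, a uniform row whose symbol is not a key of valores) and ragged grids where A happens to
-- return only because its inner loop breaks before reaching a too-short column — there B's row-set
-- comprehension indexes every column and raises.
def Pre_checarGanhos (colunas : List (List String)) (linhas : Int) (aposta : Int) (valores : List (String × Int)) : Prop :=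
  0 < linhas →
    colunas ≠ [] ∧
    (∀ c ∈ colunas, linhas ≤ (c.length : Int)) ∧
    (∀ l ∈ PySem.List.pyRange 0 linhas 1,
      (∀ c ∈ colunas, PySem.List.pyGet? c l = PySem.List.pyGet? (colunas.headD []) l) →
      ((PySem.Dict.mk valores).get? ((PySem.List.pyGet? (colunas.headD []) l).getD "")).isSome)
instance (colunas : List (List String)) (linhas : Int) (aposta : Int) (valores : List (String × Int)) : Decidable (Pre_checarGanhos colunas linhas aposta valores) := by unfold Pre_checarGanhos; infer_instance

def pvWitness_checarGanhos : List (List String) × Int × Int × (List (String × Int)) :=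
  ([["7", "A"], ["7", "B"]], 2, 3, [("7", 10), ("A", 5)])

def Spec_checarGanhos (colunas : List (List String)) (linhas : Int) (aposta : Int) (valores : List (String × Int)) (out : Int × List Int) : Prop := out = checarGanhos_alt colunas linhas aposta valores
instance (colunas : List (List String)) (linhas : Int) (aposta : Int) (valores : List (String × Int)) (out : Int × List Int) : Decidable (Spec_checarGanhos colunas linhas aposta valores out) := by unfold Spec_checarGanhos; infer_instance

-- ===== CLAIM (what is proved, stated in full; the proofs are below) =====
def Claim_equal_checarGanhos : Prop := ∀ (colunas : List (List String)) (linhas : Int) (aposta : Int) (valores : List (String × Int)), Dom_checarGanhos colunas linhas aposta valores → Pre_checarGanhos colunas linhas aposta valores → Spec_checarGanhos colunas linhas aposta valores (checarGanhos colunas linhas aposta valores)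
-- ===== LEMMAS AND PROOFS =====

-- A's inner loop finishes without break iff every column shows simbolo at linha
-- (under the in-range hypothesis the loop's IndexError branch is unreachable).
theorem pvRowA_iff (cols : List (List String)) (l : Int) (s : String)
    (h : ∀ c ∈ cols, (PySem.List.pyGet? c l).isSome = true) :
    pvRowA cols l s = true ↔ ∀ c ∈ cols, PySem.List.pyGet? c l = some s := by
  induction cols with
  | nil => simp [pvRowA]
  | cons c cs ih =>
    obtain ⟨x, hx⟩ := Option.isSome_iff_exists.mp (h c (by simp))
    have ih' := ih (fun c hc => h c (by simp [hc]))
    by_cases hsx : s = x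
    · subst hsx
      simp only [pvRowA, hx, ne_eq, not_true_eq_false, if_false, ih']
      constructor
      · intro hall c' hc'
        rcases List.mem_cons.mp hc' with rfl | hc'
        · exact hx
        · exact hall c' hc'
      · intro hall c' hc'; exact hall c' (by simp [hc'])
    · simp only [pvRowA, hx, ne_eq, hsx, not_false_eq_true, if_true]
      constructor
      · intro hf; exact absurd hf (by simp)
      · intro hall
        have := hall c (by simp)
        rw [hx] at this; exact absurd (Option.some.inj this).symm hsx

-- the set {s} ∪ ys has one element iff every element of ys is s
theorem pvSetLenOne (s : String) (ys : List String) :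
    PySem.Set.len (PySem.Set.ofList (s :: ys)) = 1 ↔ ∀ y ∈ ys, y = s := by
  have hnd := PySem.Set.nodup_ofList (s :: ys)
  have hs : s ∈ PySem.Set.ofList (s :: ys) := (PySem.Set.mem_ofList _ s).mpr (by simp)
  constructor
  · intro hlen y hy
    have hlen' : (PySem.Set.ofList (s :: ys)).length = 1 := by
      simpa [PySem.Set.len] using hlen
    obtain ⟨a, ha⟩ := List.length_eq_one_iff.mp hlen'
    have hy' : y ∈ PySem.Set.ofList (s :: ys) := (PySem.Set.mem_ofList _ y).mpr (by simp [hy])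
    rw [ha] at hs hy'
    simp at hs hy'
    exact hy'.trans hs.symm
  · intro hall
    have hone : ∀ z ∈ PySem.Set.ofList (s :: ys), z = s := by
      intro z hz
      rcases List.mem_cons.mp ((PySem.Set.mem_ofList _ z).mp hz) with rfl | h
      · rfl
      · exact hall z h
    have hlen : (PySem.Set.ofList (s :: ys)).length = 1 := by
      rcases hset : PySem.Set.ofList (s :: ys) with _ | ⟨a, rest⟩
      · rw [hset] at hs; simp at hs
      · rcases rest with _ | ⟨b, rest'⟩
        · rfl
        · exfalso
          rw [hset] at hnd hone
          have ha : a = s := hone a (by simp)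
          have hb : b = s := hone b (by simp)
          simp [ha, hb] at hnd
    simp [PySem.Set.len, hlen]

-- the main loop invariant: A's fold from any accumulator equals B's filtered construction
theorem pvFoldEq (c0 : List String) (rest : List (List String)) (valores : List (String × Int))
    (aposta : Int) (L : List Int)
    (hIdx : ∀ l ∈ L, ∀ c ∈ c0 :: rest, (PySem.List.pyGet? c l).isSome = true)
    (hKey : ∀ l ∈ L,
      (∀ c ∈ c0 :: rest, PySem.List.pyGet? c l = PySem.List.pyGet? c0 l) →
      ((PySem.Dict.mk valores).get? ((PySem.List.pyGet? c0 l).getD "")).isSome = true) :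
    ∀ g ls,
      L.foldl
        (fun st linha =>
          match PySem.List.pyGet? (c0 :: rest) 0 with
          | none => st
          | some col0 =>
            match PySem.List.pyGet? col0 linha with
            | none => st
            | some simbolo =>
              if pvRowA (c0 :: rest) linha simbolo then
                match (PySem.Dict.mk valores).get? simbolo with
                | none => st
                | some v => (st.1 + v * aposta, st.2 ++ [linha + 1])
              else st)
        (g, ls)
      = (g + aposta * ((L.filter (fun l => PySem.Set.len (pvRowSet (c0 :: rest) l) = 1)).map
            (fun l => ((PySem.Dict.mk valores).get? ((PySem.List.pyGet? c0 l).getD "")).getD 0)).sum,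
         ls ++ (L.filter (fun l => PySem.Set.len (pvRowSet (c0 :: rest) l) = 1)).map (fun l => l + 1)) := by
  induction L with
  | nil => intro g ls; simp
  | cons l L' ih =>
    intro g ls
    have hIdx' : ∀ x ∈ L', ∀ c ∈ c0 :: rest, (PySem.List.pyGet? c x).isSome = true :=
      fun x hx => hIdx x (by simp [hx])
    have hKey' : ∀ x ∈ L', (∀ c ∈ c0 :: rest, PySem.List.pyGet? c x = PySem.List.pyGet? c0 x) →
        ((PySem.Dict.mk valores).get? ((PySem.List.pyGet? c0 x).getD "")).isSome = true :=
      fun x hx => hKey x (by simp [hx])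
    obtain ⟨s, hs⟩ := Option.isSome_iff_exists.mp (hIdx l (by simp) c0 (by simp))
    -- the filter predicate at l equals A's row check
    have hiff : (PySem.Set.len (pvRowSet (c0 :: rest) l) = 1) ↔ pvRowA (c0 :: rest) l s = true := by
      have hset : pvRowSet (c0 :: rest) l
          = PySem.Set.ofList (s :: rest.map (fun c => (PySem.List.pyGet? c l).getD "")) := by
        simp [pvRowSet, hs]
      rw [hset, pvSetLenOne, pvRowA_iff _ _ _ (hIdx l (by simp))]
      constructor
      · intro hall c hc
        rcases List.mem_cons.mp hc with rfl | hc
        · exact hs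
        · obtain ⟨x, hx⟩ := Option.isSome_iff_exists.mp (hIdx l (by simp) c (by simp [hc]))
          have := hall ((PySem.List.pyGet? c l).getD "") (List.mem_map.mpr ⟨c, hc, rfl⟩)
          rw [hx] at this ⊢
          simpa using congrArg some this
      · intro hall y hy
        obtain ⟨c, hc, rfl⟩ := List.mem_map.mp hy
        rw [hall c (by simp [hc])]
        rfl
    by_cases hp : PySem.Set.len (pvRowSet (c0 :: rest) l) = 1
    · have hrow : pvRowA (c0 :: rest) l s = true := hiff.mp hp
      have huni : ∀ c ∈ c0 :: rest, PySem.List.pyGet? c l = PySem.List.pyGet? c0 l := by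
        intro c hc
        rw [(pvRowA_iff _ _ _ (hIdx l (by simp))).mp hrow c hc, hs]
      obtain ⟨v, hv⟩ := Option.isSome_iff_exists.mp (hKey l (by simp) huni)
      rw [hs] at hv
      simp only [Option.getD_some] at hv
      have IH := ih hIdx' hKey' (g + v * aposta) (ls ++ [l + 1])
      simp only [List.foldl_cons, PySem.List.pyGet?_zero_cons, hs, hrow, if_true, hv] at IH ⊢
      rw [IH]
      simp only [List.filter_cons, hp, decide_true, List.map_cons, List.sum_cons, hs,
        Option.getD_some, hv, Prod.mk.injEq, if_true]
      exact ⟨by ring, by simp⟩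
    · have hrow : pvRowA (c0 :: rest) l s = false := by
        rcases hb : pvRowA (c0 :: rest) l s with _ | _
        · rfl
        · exact absurd (hiff.mpr hb) hp
      have IH := ih hIdx' hKey' g ls
      simp only [List.foldl_cons, PySem.List.pyGet?_zero_cons, hs, hrow, Bool.false_eq_true,
        if_false] at IH ⊢
      rw [IH]
      have hpb : (decide ((pvRowSet (c0 :: rest) l).len = 1)) = false := decide_eq_false hp
      simp only [List.filter_cons, hpb, Bool.false_eq_true, if_false]

-- ===== VERDICT (by name: the statement is the Claim_ definition above) =====
theorem checarGanhos_spec : Claim_equal_checarGanhos := by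
  intro colunas linhas aposta valores _ hPre
  unfold Spec_checarGanhos checarGanhos checarGanhos_alt
  by_cases hlin : 0 < linhas
  · obtain ⟨hne, hlen, hkey⟩ := hPre hlin
    obtain ⟨c0, rest, rfl⟩ : ∃ c0 rest, colunas = c0 :: rest := by
      rcases colunas with _ | ⟨c0, rest⟩
      · exact absurd rfl hne
      · exact ⟨c0, rest, rfl⟩
    have hIdx : ∀ l ∈ PySem.List.pyRange 0 linhas 1, ∀ c ∈ c0 :: rest,
        (PySem.List.pyGet? c l).isSome = true := by
      intro l hl c hc
      obtain ⟨h0, h1⟩ := PySem.List.mem_pyRange_one.mp hl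
      have hcl := hlen c hc
      have hlt : l.toNat < c.length := by omega
      rw [PySem.List.pyGet?_of_nonneg _ h0, List.getElem?_eq_getElem hlt]
      rfl
    have hKey : ∀ l ∈ PySem.List.pyRange 0 linhas 1,
        (∀ c ∈ c0 :: rest, PySem.List.pyGet? c l = PySem.List.pyGet? c0 l) →
        ((PySem.Dict.mk valores).get? ((PySem.List.pyGet? c0 l).getD "")).isSome = true := by
      intro l hl huni
      simpa using hkey l hl (by simpa using huni)
    rw [pvFoldEq c0 rest valores aposta (PySem.List.pyRange 0 linhas 1) hIdx hKey 0 []]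
    simp only [PySem.List.pyGet?_zero_cons, Option.getD_some, List.nil_append, List.map_map]
    simp only [Prod.mk.injEq]
    refine ⟨?_, trivial⟩
    rw [zero_add]
    congr 2
    apply List.map_congr_left
    intro x _
    simp only [Function.comp_apply, add_sub_cancel_right]
  · rw [PySem.List.pyRange_one_eq_nil (by omega)]
    simp
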